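-- pv_equiv track=rewrite | github.com/zeozeozeo/clickpack-db | audio2ogg.py | analyze_archive_structure
-- ===== SOURCE A (Python) =====
-- def analyze_archive_structure(file_names):
--     """Analyze archive structure to determine if it has a single root directory."""
--     has_single_root = False
--     root_dir_name = None
--
--     if file_names:
--         # get the top-level directories and files
--         top_level_entries = set()
--         for name in file_names:
--             # normalize path separators and get the first component
--             name = name.replace('\\', '/')
--             parts = name.split('/')
--             if parts[0]:  # ignore empty strings
--                 top_level_entries.add(parts[0])
--
--         # if there's only one top-level entry and it's a directory,
--         # then all files are contained within a single root directory
--         if len(top_level_entries) == 1: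
--             potential_root = list(top_level_entries)[0]
--             # check if this entry represents a directory by looking for entries inside it
--             if any(name.replace('\\', '/').startswith(potential_root + '/') for name in file_names):
--                 has_single_root = True
--                 root_dir_name = potential_root
--
--     return has_single_root, root_dir_name
-- ===== SOURCE B (Python) =====
-- def analyze_archive_structure(file_names):
--     """Analyze archive structure to determine if it has a single root directory.
--
--     Single pass: index each name's first path component in a dict, OR-ing a
--     'has something nested below it' flag; then an O(1) check of the index.
--     """
--     roots = {}
--     for name in file_names:
--         first, sep, _rest = name.replace('\\', '/').partition('/')
--         if first:
--             roots[first] = roots.get(first, False) or bool(sep)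
--     if len(roots) == 1:
--         root, nested = next(iter(roots.items()))
--         if nested:
--             return True, root
--     return False, None
-- ===== Notes on version B (the rewrite author's own statement) =====
-- stated objective: alternative
-- what changed: Replaces A's two-phase scheme (build a set of first components, then re-scan all names with string concatenation + startswith to test nestedness) by a single pass that indexes each name's first path component (via str.partition) in a dict OR-ing a nested flag, followed by an O(1) check of the index.
import Mathlib
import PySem

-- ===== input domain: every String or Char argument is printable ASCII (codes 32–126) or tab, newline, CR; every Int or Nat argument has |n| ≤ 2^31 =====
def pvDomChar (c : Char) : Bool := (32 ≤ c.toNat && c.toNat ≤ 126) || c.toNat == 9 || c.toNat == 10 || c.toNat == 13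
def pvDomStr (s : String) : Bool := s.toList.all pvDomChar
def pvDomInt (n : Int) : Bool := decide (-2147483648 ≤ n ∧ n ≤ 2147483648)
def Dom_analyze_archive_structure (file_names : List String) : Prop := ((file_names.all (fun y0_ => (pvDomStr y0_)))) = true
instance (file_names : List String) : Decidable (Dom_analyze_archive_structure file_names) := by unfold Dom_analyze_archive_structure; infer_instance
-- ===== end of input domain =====

-- B replaces A's two-phase scheme (set of first components, then a second startswith scan
-- over all names) by one dict-building pass plus an O(1) check of the index (objective: alternative).

-- ===== PORT A =====
-- Literal port of A; paths are handled as List Char (PySem.Chars).  `list(top_level_entries)[0]`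
-- is taken only under `len(top_level_entries) == 1`, where it is the unique element, so the
-- result does not depend on Python's set iteration order.
def analyze_archive_structure (file_names : List String) : Bool × Option String :=
  if file_names.isEmpty then (false, none) else
    let top_level_entries : PySem.Set (List Char) :=
      file_names.foldl (fun s name =>
        let nm := PySem.Chars.replace name.toList ['\\'] ['/']
        let parts := PySem.Chars.splitOn nm ['/']
        if PySem.List.pyGetD parts 0 [] ≠ [] then
          PySem.Set.add s (PySem.List.pyGetD parts 0 [])
        else s) PySem.Set.empty
    if PySem.Set.len top_level_entries = 1 then
      let potential_root := PySem.List.pyGetD top_level_entries 0 []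
      if file_names.any (fun name =>
          PySem.Chars.startswith (PySem.Chars.replace name.toList ['\\'] ['/'])
            (potential_root ++ ['/'])) then
        (true, some (String.ofList potential_root))
      else (false, none)
    else (false, none)

-- ===== PORT B =====
-- Hand port of Source B's `norm.partition('/')`, exact for this single-char separator:
-- returns (the part before the first '/', whether a '/' occurred) — B only uses `first`
-- and `bool(sep)`, so the part after the separator is not materialised.
def pyPartition1 (c0 : Char) : List Char → List Char × Bool
  | [] => ([], false)
  | c :: rest =>
      if c == c0 then ([], true)
      else
        let p := pyPartition1 c0 rest
        (c :: p.1, p.2)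

def analyze_archive_structure_alt (file_names : List String) : Bool × Option String :=
  let roots : PySem.Dict (List Char) Bool :=
    file_names.foldl (fun d name =>
      let p := pyPartition1 '/' (PySem.Chars.replace name.toList ['\\'] ['/'])
      if p.1 ≠ [] then d.insert p.1 (d.getD p.1 false || p.2) else d) PySem.Dict.empty
  match roots.items with
  | [(root, true)] => (true, some (String.ofList root))
  | _ => (false, none)

-- ===== PRECONDITION & SPEC =====
def Spec_analyze_archive_structure (file_names : List String) (out : Bool × Option String) : Prop := out = analyze_archive_structure_alt file_names
instance (file_names : List String) (out : Bool × Option String) : Decidable (Spec_analyze_archive_structure file_names out) := by unfold Spec_analyze_archive_structure; infer_instance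

-- ===== CLAIM (what is proved, stated in full; the proofs are below) =====
def Claim_equal_analyze_archive_structure : Prop := ∀ (file_names : List String), Dom_analyze_archive_structure file_names → Spec_analyze_archive_structure file_names (analyze_archive_structure file_names)

-- ===== LEMMAS AND PROOFS =====

-- first path component / nestedness of one name (after normalizing separators)
def pvKey (name : String) : List Char :=
  (PySem.Chars.replace name.toList ['\\'] ['/']).takeWhile (· != '/')

def pvNested (name : String) : Bool :=
  (PySem.Chars.replace name.toList ['\\'] ['/']).contains '/'

def pvPairOpt (name : String) : Option (List Char × Bool) :=
  if pvKey name = [] then none else some (pvKey name, pvNested name)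

-- reference single-char splitter (= Chars.splitOn with separator [c0], without the fuel)
def pvSplit1 (c0 : Char) : List Char → List Char → List (List Char)
  | [], cur => [cur.reverse]
  | c :: rest, cur =>
      if c0 == c then cur.reverse :: pvSplit1 c0 rest []
      else pvSplit1 c0 rest (c :: cur)

theorem pvSplitOn_go_eq (c0 : Char) :
    ∀ (fuel : Nat) (l cur : List Char) (acc : List (List Char)), l.length < fuel →
      PySem.Chars.splitOn.go [c0] fuel l cur acc = acc.reverse ++ pvSplit1 c0 l cur := by
  intro fuel
  induction fuel with
  | zero => intro l cur acc h; omega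
  | succ n ih =>
    intro l cur acc h
    cases l with
    | nil => simp [PySem.Chars.splitOn.go, pvSplit1]
    | cons c rest =>
      simp only [PySem.Chars.splitOn.go, List.isPrefixOf, pvSplit1]
      by_cases hc : (c0 == c) = true
      · rw [if_pos (by simp [hc]), if_pos hc, ih _ _ _ (by simpa using Nat.lt_of_succ_lt_succ h)]
        simp
      · rw [if_neg (by simp [hc]), if_neg hc, ih _ _ _ (by simpa using Nat.lt_of_succ_lt_succ h)]

theorem pvSplitOn_eq (c0 : Char) (l : List Char) :
    PySem.Chars.splitOn l [c0] = pvSplit1 c0 l [] := by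
  unfold PySem.Chars.splitOn
  exact (pvSplitOn_go_eq c0 (l.length + 1) l [] [] (by omega)).trans (by simp)

theorem pvSplit1_head (c0 : Char) :
    ∀ (l cur : List Char), (pvSplit1 c0 l cur).getD 0 [] = cur.reverse ++ l.takeWhile (· != c0) := by
  intro l
  induction l with
  | nil => intro cur; simp [pvSplit1]
  | cons c rest ih =>
    intro cur
    by_cases hc : (c0 == c) = true
    · have h2 : (c != c0) = false := by
        have := eq_of_beq hc; simp [this]
      simp [pvSplit1, hc, List.takeWhile, h2]
    · have hne : (c != c0) = true := by
        simp only [bne_iff_ne, ne_eq]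
        intro he; exact hc (by simp [he])
      simp only [pvSplit1, if_neg hc, ih, List.takeWhile, hne, List.reverse_cons,
        List.append_assoc, List.singleton_append]

-- A's `parts[0]` is the part of the normalized name before its first '/'
theorem pvPartsZero (l : List Char) :
    PySem.List.pyGetD (PySem.Chars.splitOn l ['/']) 0 [] = l.takeWhile (· != '/') := by
  rw [PySem.List.pyGetD_zero, pvSplitOn_eq, pvSplit1_head]
  simp

-- B's partition helper computes takeWhile / contains
theorem pvPartition1_spec (c0 : Char) (l : List Char) :
    pyPartition1 c0 l = (l.takeWhile (· != c0), l.contains c0) := by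
  induction l with
  | nil => simp [pyPartition1]
  | cons c rest ih =>
    by_cases hc : (c == c0) = true
    · have := eq_of_beq hc
      simp [pyPartition1, List.takeWhile, this]
    · have hne : (c != c0) = true := by simp [bne, hc]
      simp [pyPartition1, hc, List.takeWhile, hne, ih]
      exact fun he => absurd (by simp [he] : (c == c0) = true) hc

-- `name.startswith(root + '/')` on a normalized name, for a root that is itself a first
-- component (no '/'): it holds iff the name's first component is `root` and a '/' follows.
theorem pvStartswith_iff (nm r : List Char) (hr : ∀ c ∈ r, c ≠ '/') :
    PySem.Chars.startswith nm (r ++ ['/']) = true ↔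
      (nm.takeWhile (· != '/') = r ∧ '/' ∈ nm) := by
  constructor
  · intro h
    have hpre : (r ++ ['/']) <+: nm := (PySem.Chars.startswith_iff nm (r ++ ['/'])).mp h
    obtain ⟨t, ht⟩ := hpre
    subst ht
    constructor
    · rw [List.append_assoc, List.takeWhile_append]
      have hself : r.takeWhile (· != '/') = r :=
        List.takeWhile_eq_self_iff.mpr (fun c hc => by simpa [bne_iff_ne] using hr c hc)
      simp [hself]
    · simp
  · rintro ⟨h1, h2⟩
    have hsplit := List.takeWhile_append_dropWhile (p := (· != '/')) (l := nm)
    have hnd : nm.dropWhile (· != '/') ≠ [] := by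
      intro hnil
      rw [← hsplit, hnil, List.append_nil] at h2
      have := List.mem_takeWhile_imp h2
      simp at this
    have hhead' : (nm.dropWhile (· != '/')).head hnd = '/' := by
      have := List.head_dropWhile_not (p := (· != '/')) hnd
      simpa using this
    have hcons : nm.dropWhile (· != '/') = '/' :: (nm.dropWhile (· != '/')).tail := by
      nth_rewrite 1 [← List.cons_head_tail hnd]; rw [hhead']
    apply (PySem.Chars.startswith_iff nm (r ++ ['/'])).mpr
    refine ⟨(nm.dropWhile (· != '/')).tail, ?_⟩
    conv_rhs => rw [← hsplit, h1, hcons]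
    simp

-- A's set-building loop, in closed form
def pvStepA (s : PySem.Set (List Char)) (name : String) : PySem.Set (List Char) :=
  if pvKey name ≠ [] then PySem.Set.add s (pvKey name) else s

def pvStepB (d : PySem.Dict (List Char) Bool) (name : String) : PySem.Dict (List Char) Bool :=
  if pvKey name ≠ [] then d.insert (pvKey name) (d.getD (pvKey name) false || pvNested name) else d

theorem pvStepA_eq : (fun (s : PySem.Set (List Char)) (name : String) =>
    let nm := PySem.Chars.replace name.toList ['\\'] ['/']
    let parts := PySem.Chars.splitOn nm ['/']
    if PySem.List.pyGetD parts 0 [] ≠ [] then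
      PySem.Set.add s (PySem.List.pyGetD parts 0 [])
    else s) = pvStepA := by
  funext s name
  simp only [pvStepA, pvKey, pvPartsZero]

theorem pvStepB_eq : (fun (d : PySem.Dict (List Char) Bool) (name : String) =>
    let p := pyPartition1 '/' (PySem.Chars.replace name.toList ['\\'] ['/'])
    if p.1 ≠ [] then d.insert p.1 (d.getD p.1 false || p.2) else d) = pvStepB := by
  funext d name
  simp only [pvStepB, pvKey, pvNested, pvPartition1_spec]

theorem pvAfold' : ∀ (l : List String) (s : PySem.Set (List Char)),
    l.foldl pvStepA s = PySem.Set.update s ((l.filterMap pvPairOpt).map Prod.fst) := by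
  intro l
  induction l with
  | nil => intro s; simp [PySem.Set.update]
  | cons x rest ih =>
    intro s
    simp only [List.foldl_cons, List.filterMap_cons]
    by_cases hk : pvKey x = []
    · rw [show pvStepA s x = s by simp [pvStepA, hk],
         show pvPairOpt x = none by simp [pvPairOpt, hk]]
      exact ih s
    · rw [show pvStepA s x = PySem.Set.add s (pvKey x) by simp [pvStepA, hk],
         show pvPairOpt x = some (pvKey x, pvNested x) by simp [pvPairOpt, hk]]
      simp only [List.map_cons]
      rw [ih, PySem.Set.update_cons]

theorem pvBfold' : ∀ (l : List String) (d : PySem.Dict (List Char) Bool),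
    l.foldl pvStepB d
      = (l.filterMap pvPairOpt).foldl (fun d p => d.insert p.1 (d.getD p.1 false || p.2)) d := by
  intro l
  induction l with
  | nil => intro d; simp
  | cons x rest ih =>
    intro d
    simp only [List.foldl_cons, List.filterMap_cons]
    by_cases hk : pvKey x = []
    · rw [show pvStepB d x = d by simp [pvStepB, hk],
         show pvPairOpt x = none by simp [pvPairOpt, hk]]
      exact ih d
    · rw [show pvStepB d x = d.insert (pvKey x) (d.getD (pvKey x) false || pvNested x) by
        simp [pvStepB, hk],
         show pvPairOpt x = some (pvKey x, pvNested x) by simp [pvPairOpt, hk]]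
      simp only [List.foldl_cons]
      exact ih _


-- the flag stored for key k is the OR of the flags of all pairs carrying that key
theorem pvGetD_or : ∀ (ps : List (List Char × Bool)) (d : PySem.Dict (List Char) Bool) (k : List Char),
    (ps.foldl (fun d p => d.insert p.1 (d.getD p.1 false || p.2)) d).getD k false
      = (d.getD k false || ps.any (fun p => p.1 == k && p.2)) := by
  intro ps
  induction ps with
  | nil => intro d k; simp
  | cons p rest ih =>
    intro d k
    simp only [List.foldl_cons, List.any_cons, ih, PySem.Dict.getD_insert]
    by_cases hk : k = p.1
    · subst hk; simp [Bool.or_assoc, Bool.or_left_comm]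
    · have hne : (p.1 == k) = false := by
        simp only [beq_eq_false_iff_ne, ne_eq]
        exact fun he => hk he.symm
      rw [if_neg hk, hne]
      simp

-- the whole-list any-scan A performs equals the OR-flag B stored for the unique root
theorem pvAny_eq (file_names : List String) (r : List Char)
    (hr : ∀ c ∈ r, c ≠ '/') (hr0 : r ≠ []) :
    (file_names.any (fun name =>
        PySem.Chars.startswith (PySem.Chars.replace name.toList ['\\'] ['/']) (r ++ ['/'])))
      = (file_names.filterMap pvPairOpt).any (fun p => p.1 == r && p.2) := by
  rw [Bool.eq_iff_iff]
  simp only [List.any_eq_true, List.mem_filterMap]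
  constructor
  · rintro ⟨x, hx, hsw⟩
    obtain ⟨h1, h2⟩ := (pvStartswith_iff _ r hr).mp hsw
    have hkey : pvKey x = r := h1
    have hnst : pvNested x = true := by simpa [pvNested, List.contains_iff_mem] using h2
    have hne : pvKey x ≠ [] := by rw [hkey]; exact hr0
    exact ⟨(pvKey x, pvNested x), ⟨x, hx, by simp [pvPairOpt, hne]⟩,
      by simp [hkey, hnst]⟩
  · rintro ⟨p, ⟨x, hx, hpx⟩, hp⟩
    simp only [pvPairOpt] at hpx
    by_cases hk : pvKey x = []
    · simp [hk] at hpx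
    · rw [if_neg hk] at hpx
      obtain rfl : p = (pvKey x, pvNested x) := by injection hpx with h; exact h.symm
      simp only [Bool.and_eq_true, beq_iff_eq] at hp
      refine ⟨x, hx, ?_⟩
      exact (pvStartswith_iff _ r hr).mpr
        ⟨hp.1 ▸ rfl, by simpa [pvNested, List.contains_iff_mem] using hp.2⟩

-- every first component collected is nonempty and contains no '/'
theorem pvRoot_prop {r : List Char} {l : List String}
    (h : r ∈ (l.filterMap pvPairOpt).map Prod.fst) : r ≠ [] ∧ ∀ c ∈ r, c ≠ '/' := by
  simp only [List.mem_map, List.mem_filterMap] at h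
  obtain ⟨p, ⟨x, _, hpx⟩, hpr⟩ := h
  simp only [pvPairOpt] at hpx
  by_cases hk : pvKey x = []
  · simp [hk] at hpx
  · rw [if_neg hk] at hpx
    obtain rfl : p = (pvKey x, pvNested x) := by injection hpx with h; exact h.symm
    subst hpr
    refine ⟨hk, fun c hc => ?_⟩
    have := List.mem_takeWhile_imp hc
    simpa using this

-- a two-or-more-entry index never matches the single-root pattern
theorem pvMatch2 (p q : List Char × Bool) (rest : List (List Char × Bool)) :
    (match p :: q :: rest with
     | [(root, true)] => (true, some (String.ofList root))
     | _ => ((false, none) : Bool × Option String)) = ((false, none) : Bool × Option String) := by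
  rcases p with ⟨a, _ | _⟩ <;> rfl

-- main equivalence
theorem pvMain (file_names : List String) :
    analyze_archive_structure file_names = analyze_archive_structure_alt file_names := by
  unfold analyze_archive_structure analyze_archive_structure_alt
  rw [pvStepA_eq, pvStepB_eq]
  simp only [pvAfold', pvBfold', PySem.Set.update_empty]
  set ps := file_names.filterMap pvPairOpt with hps
  have hkeys : ((ps.foldl (fun d p => d.insert p.1 (d.getD p.1 false || p.2)) PySem.Dict.empty)).keys
      = PySem.Set.ofList (ps.map Prod.fst) := by
    rw [PySem.Dict.keys_foldl_insert_key ps Prod.fst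
      (fun d x => d.getD x.1 false || x.2) PySem.Dict.empty]
    exact PySem.Set.update_nil_left _
  have hnodup : ((ps.foldl (fun d p => d.insert p.1 (d.getD p.1 false || p.2)) PySem.Dict.empty)).keys.Nodup := by
    apply PySem.Dict.nodup_keys_foldl_insert_key
    simp
  have hitems := PySem.Dict.items_eq_map_keys _ hnodup false
  rw [hkeys] at hitems
  rcases hSl : PySem.Set.ofList (ps.map Prod.fst) with _ | ⟨r, tail⟩
  · -- no (nonempty) top-level entry at all
    rw [hSl] at hitems
    rw [hitems]
    simp [PySem.Set.len]
  · rcases tail with _ | ⟨r2, tail⟩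
    · -- exactly one top-level entry r
      have hrmem : r ∈ ps.map Prod.fst := by
        have : r ∈ PySem.Set.ofList (ps.map Prod.fst) := by rw [hSl]; exact List.mem_cons_self
        exact (PySem.Set.mem_ofList _ _).mp this
      obtain ⟨hr0, hr⟩ := pvRoot_prop (l := file_names) (hps ▸ hrmem)
      rw [hSl] at hitems
      rw [hitems]
      simp only [List.map_cons, List.map_nil]
      rw [pvGetD_or ps PySem.Dict.empty r]
      rw [show (PySem.Dict.empty : PySem.Dict (List Char) Bool).getD r false = false from rfl]
      rw [Bool.false_or]
      have hfe : file_names.isEmpty = false := by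
        rcases file_names with _ | _
        · exfalso
          have : ps = [] := by rw [hps]; rfl
          rw [this] at hSl
          simp [PySem.Set.ofList] at hSl
        · rfl
      rw [hfe]
      simp only [PySem.Set.len, Bool.false_eq_true, if_false, List.length_cons,
        List.length_nil, PySem.List.pyGetD_zero_cons]
      rw [pvAny_eq file_names r hr hr0, ← hps]
      rcases hv : ps.any (fun p => p.1 == r && p.2) with _ | _
      · rfl
      · rfl
    · -- two or more distinct top-level entries
      rw [hSl] at hitems
      rw [hitems]
      simp only [List.map_cons]
      have h2 : ¬ (PySem.Set.len (r :: r2 :: tail) = (1 : Int)) := by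
        simp only [PySem.Set.len, List.length_cons]
        intro h
        omega
      rw [if_neg h2, ite_self]
      exact (pvMatch2 _ _ _).symm

-- ===== VERDICT (by name: the statement is the Claim_ definition above) =====
theorem analyze_archive_structure_spec : Claim_equal_analyze_archive_structure := by
  intro file_names _
  unfold Spec_analyze_archive_structure
  exact pvMain file_names
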